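-- pv_equiv track=rewrite | github.com/mhermsdorferf5/bigip-notes | misc-scripts/bigipConfigParser_getAFMConfig.py | remove_sub_block
-- ===== SOURCE A (Python) =====
-- def remove_sub_block(stanza: str, block_name: str) -> str:
--     """Remove a named sub-block (e.g. 'interfaces { ... }') from a stanza."""
--     result = []
--     lines = stanza.splitlines(keepends=True)
--     i = 0
--     while i < len(lines):
--         stripped = lines[i].strip()
--         if stripped == f"{block_name} {{" or stripped.startswith(f"{block_name} {{"):
--             # Skip this line and all lines until the block's closing brace
--             depth = lines[i].count("{") - lines[i].count("}")
--             i += 1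
--             while i < len(lines) and depth > 0:
--                 depth += lines[i].count("{") - lines[i].count("}")
--                 i += 1
--         else:
--             result.append(lines[i])
--             i += 1
--     return "".join(result)
-- ===== SOURCE B (Python) =====
-- def remove_sub_block(stanza: str, block_name: str) -> str:
--     """Remove a named sub-block (e.g. 'interfaces { ... }') from a stanza."""
--     lines = stanza.splitlines(keepends=True)
--     n = len(lines)
--     prefix = f"{block_name} {{"
--     # Pass 1: cumulative brace depth (cum[k] = nesting depth after the first k lines).
--     cum = [0]
--     for line in lines:
--         cum.append(cum[-1] + line.count("{") - line.count("}"))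
--     # Pass 2: mark the index ranges of the blocks to remove.  A block starting at
--     # line i ends just before the first later line at which the depth has fallen
--     # back to (or below) the depth before the block (or at EOF if never).
--     removed = set()
--     i = 0
--     while i < n:
--         if lines[i].strip().startswith(prefix):
--             j = i + 1
--             while j < n and cum[j] > cum[i]:
--                 j += 1
--             removed.update(range(i, j))
--             i = j
--         else:
--             i += 1
--     # Pass 3: keep every unmarked line.
--     return "".join(line for k, line in enumerate(lines) if k not in removed)
-- ===== Notes on version B (the rewrite author's own statement) =====
-- stated objective: alternative
-- what changed: Replaces A's single scan, whose nested skip-loop carries a running brace-depth counter, by three staged passes: a prefix-sum array of per-line brace deltas, a marking pass that finds each block's end as the first index where the cumulative depth returns to the block's starting depth and records the removed index range in a set, and a final filter keeping the unmarked lines.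
import Mathlib
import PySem

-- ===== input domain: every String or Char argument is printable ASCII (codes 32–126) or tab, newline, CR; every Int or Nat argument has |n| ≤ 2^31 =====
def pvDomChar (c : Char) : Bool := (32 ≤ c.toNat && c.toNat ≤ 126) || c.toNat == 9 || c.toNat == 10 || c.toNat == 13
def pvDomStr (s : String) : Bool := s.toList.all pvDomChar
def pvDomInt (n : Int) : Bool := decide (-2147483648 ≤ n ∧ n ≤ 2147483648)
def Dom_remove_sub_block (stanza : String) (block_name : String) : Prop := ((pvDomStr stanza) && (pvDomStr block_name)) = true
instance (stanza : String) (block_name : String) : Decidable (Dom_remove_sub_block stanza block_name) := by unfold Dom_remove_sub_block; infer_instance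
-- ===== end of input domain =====

-- B replaces A's single scan with its nested brace-depth skip-loop by three staged passes:
-- a prefix-sum array of per-line brace deltas, a marking pass that finds each block's end as
-- the first index where the cumulative depth returns to the block's starting depth and records
-- the removed index range in a set, and a final filter keeping unmarked lines; objective: alternative.

-- ===== PORT A =====
-- shared helper: str.splitlines(keepends=True) on the Dom character set (line breaks are \n, \r, \r\n;
-- exact there — other Unicode line breaks are outside Dom)
def pvSplitKeepAux (cur : List Char) : List Char → List (List Char)
  | [] => if cur = [] then [] else [cur.reverse]
  | '\r' :: '\n' :: rest => (cur.reverse ++ ['\r', '\n']) :: pvSplitKeepAux [] rest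
  | '\r' :: rest => (cur.reverse ++ ['\r']) :: pvSplitKeepAux [] rest
  | '\n' :: rest => (cur.reverse ++ ['\n']) :: pvSplitKeepAux [] rest
  | c :: rest => pvSplitKeepAux (c :: cur) rest

def pvSplitKeep (cs : List Char) : List (List Char) := pvSplitKeepAux [] cs

-- shared helper: line.count("{") - line.count("}")
def pvDiff (l : List Char) : Int :=
  (PySem.Chars.count l ['{'] : Int) - (PySem.Chars.count l ['}'] : Int)

-- A's inner while: skip lines while depth > 0, returning the remaining lines
def pvSkipA (d : Int) : List (List Char) → List (List Char)
  | [] => []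
  | l :: rest => if 0 < d then pvSkipA (d + pvDiff l) rest else l :: rest

theorem pvSkipA_length_le (d : Int) (ls : List (List Char)) :
    (pvSkipA d ls).length ≤ ls.length := by
  induction ls generalizing d with
  | nil => simp [pvSkipA]
  | cons l rest ih =>
    simp only [pvSkipA]
    split
    · exact Nat.le_succ_of_le (ih _)
    · exact Nat.le_refl _

-- A's branch test: stripped == f"{bn} {" or stripped.startswith(f"{bn} {")
def pvCondA (bnl : List Char) (l : List Char) : Bool :=
  let stripped := PySem.Chars.strip l
  stripped == bnl ++ [' ', '{'] || PySem.Chars.startswith stripped (bnl ++ [' ', '{'])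

-- A's outer while over the line list
def pvGoA (bnl : List Char) : List (List Char) → List (List Char)
  | [] => []
  | l :: rest =>
    if pvCondA bnl l then pvGoA bnl (pvSkipA (pvDiff l) rest)
    else l :: pvGoA bnl rest
termination_by ls => ls.length
decreasing_by
  · exact Nat.lt_succ_of_le (pvSkipA_length_le _ _)
  · simp

def remove_sub_block (stanza : String) (block_name : String) : String :=
  String.ofList (PySem.Chars.join [] (pvGoA block_name.toList (pvSplitKeep stanza.toList)))

-- ===== PORT B =====
-- B's pass 1: the loop 'cum = [0]; for line in lines: cum.append(cum[-1] + diff(line))'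
-- (the running scan of the per-line deltas, same values appended in the same order)
def pvScan (a : Int) : List Int → List Int
  | [] => [a]
  | d :: ds => a :: pvScan (a + d) ds

-- B's inner while: 'j = i + 1; while j < n and cum[j] > cum[i]: j += 1'
-- (cum[j] is in range whenever j < n, so getD is exact here; the fuel argument only
-- makes the loop structurally total — any fuel ≥ n - j computes the while loop exactly)
def pvFindEnd (cum : List Int) (n : Nat) (c : Int) : Nat → Nat → Nat
  | 0, j => j
  | fuel + 1, j => if j < n ∧ c < cum.getD j 0 then pvFindEnd cum n c fuel (j + 1) else j

-- B's pass 2: the outer while collecting 'removed' (removed.update(range(i, j)); i = j);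
-- fuel again only makes the loop structurally total (any fuel > n - i is exact)
def pvMark (lines : List (List Char)) (cum : List Int) (bnl : List Char) (n : Nat) :
    Nat → Nat → PySem.Set Nat → PySem.Set Nat
  | 0, _, removed => removed
  | fuel + 1, i, removed =>
    if i < n then
      if PySem.Chars.startswith (PySem.Chars.strip (lines.getD i [])) (bnl ++ [' ', '{']) then
        pvMark lines cum bnl n fuel (pvFindEnd cum n (cum.getD i 0) n (i + 1))
          (PySem.Set.update removed (List.range' i (pvFindEnd cum n (cum.getD i 0) n (i + 1) - i)))
      else pvMark lines cum bnl n fuel (i + 1) removed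
    else removed

-- B's pass 3: ''.join(line for k, line in enumerate(lines) if k not in removed)
def remove_sub_block_alt (stanza : String) (block_name : String) : String :=
  let lines := pvSplitKeep stanza.toList
  let cum := pvScan 0 (lines.map pvDiff)
  let removed := pvMark lines cum block_name.toList lines.length (lines.length + 1) 0 PySem.Set.empty
  String.ofList (PySem.Chars.join []
    (((lines.zipIdx).filter (fun p => !(PySem.Set.contains removed p.2))).map (·.1)))

-- ===== PRECONDITION & SPEC =====
def Spec_remove_sub_block (stanza : String) (block_name : String) (out : String) : Prop := out = remove_sub_block_alt stanza block_name
instance (stanza : String) (block_name : String) (out : String) : Decidable (Spec_remove_sub_block stanza block_name out) := by unfold Spec_remove_sub_block; infer_instance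

-- ===== CLAIM (what is proved, stated in full; the proofs are below) =====
def Claim_equal_remove_sub_block : Prop := ∀ (stanza : String) (block_name : String), Dom_remove_sub_block stanza block_name → Spec_remove_sub_block stanza block_name (remove_sub_block stanza block_name)

-- ===== LEMMAS AND PROOFS =====

-- A's test reduces to B's: list equality implies prefix
theorem pvCondA_eq (bnl l : List Char) :
    pvCondA bnl l = PySem.Chars.startswith (PySem.Chars.strip l) (bnl ++ [' ', '{']) := by
  unfold pvCondA
  by_cases h : PySem.Chars.strip l = bnl ++ [' ', '{']
  · simp [h, PySem.Chars.startswith_iff]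
  · simp [h]

-- the number of lines A's inner while consumes, as a function of the delta list
def pvSkipCnt (d : Int) : List Int → Nat
  | [] => 0
  | x :: xs => if 0 < d then pvSkipCnt (d + x) xs + 1 else 0

theorem pvSkipCnt_le (d : Int) (xs : List Int) : pvSkipCnt d xs ≤ xs.length := by
  induction xs generalizing d with
  | nil => simp [pvSkipCnt]
  | cons x xs ih =>
    simp only [pvSkipCnt]
    split
    · exact Nat.succ_le_succ (ih _)
    · exact Nat.zero_le _

theorem pvSkipA_eq_drop (ls : List (List Char)) : ∀ d : Int,
    pvSkipA d ls = ls.drop (pvSkipCnt d (ls.map pvDiff)) := by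
  induction ls with
  | nil => intro d; simp [pvSkipA, pvSkipCnt]
  | cons l rest ih =>
    intro d
    simp only [pvSkipA, List.map_cons, pvSkipCnt]
    split
    · rw [ih]; rfl
    · rfl

theorem pvScan_getD (ds : List Int) : ∀ (a : Int) (j : Nat), j ≤ ds.length →
    (pvScan a ds).getD j 0 = a + (ds.take j).sum := by
  induction ds with
  | nil =>
    intro a j hj
    have hj0 : j = 0 := Nat.le_zero.mp (by simpa using hj)
    simp [hj0, pvScan]
  | cons d ds ih =>
    intro a j hj
    cases j with
    | zero => simp [pvScan]
    | succ j =>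
      simp only [pvScan, List.getD_cons_succ, List.take_succ_cons, List.sum_cons]
      rw [ih (a + d) j (by simpa using hj)]
      ring

-- with enough fuel, the fuel-guarded inner while computes the first index at which the
-- cumulative sum falls back to (or below) C — expressed through pvSkipCnt
theorem pvFindEnd_eq (ds : List Int) (C : Int) : ∀ (fuel j : Nat),
    ds.length - j ≤ fuel → j ≤ ds.length →
    pvFindEnd (pvScan 0 ds) ds.length C fuel j
      = j + pvSkipCnt ((ds.take j).sum - C) (ds.drop j) := by
  intro fuel
  induction fuel with
  | zero =>
    intro j hfuel hj
    have hj' : j = ds.length := by omega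
    simp [hj', pvFindEnd, pvSkipCnt]
  | succ fuel ih =>
    intro j hfuel hj
    rw [pvFindEnd]
    by_cases hlt : j < ds.length
    · have hdrop : ds.drop j = ds[j] :: ds.drop (j + 1) := List.drop_eq_getElem_cons hlt
      rw [pvScan_getD ds 0 j hj]
      simp only [zero_add]
      by_cases hc : C < (ds.take j).sum
      · rw [if_pos ⟨hlt, hc⟩, ih (j + 1) (by omega) hlt, hdrop]
        simp only [pvSkipCnt, if_pos (by omega : (0:Int) < (ds.take j).sum - C)]
        have hsum : (ds.take j).sum - C + ds[j] = (ds.take (j + 1)).sum - C := by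
          rw [List.sum_take_succ ds j hlt]; ring
        rw [hsum]
        omega
      · rw [if_neg (by tauto), hdrop]
        simp only [pvSkipCnt, if_neg (by omega : ¬ (0:Int) < (ds.take j).sum - C)]
        omega
    · have hj' : j = ds.length := le_antisymm hj (Nat.le_of_not_lt hlt)
      rw [if_neg (by omega)]
      simp [hj', pvSkipCnt]

-- the inner while never moves j backwards (any fuel)
theorem le_pvFindEnd (cum : List Int) (n : Nat) (c : Int) : ∀ (fuel j : Nat),
    j ≤ pvFindEnd cum n c fuel j := by
  intro fuel
  induction fuel with
  | zero => intro j; simp [pvFindEnd]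
  | succ fuel ih =>
    intro j
    rw [pvFindEnd]
    split
    · exact Nat.le_trans (Nat.le_succ j) (ih (j + 1))
    · exact Nat.le_refl j

-- membership in a Python set after update (foldl of Set.add)
theorem pv_mem_set_update (l : List Nat) : ∀ (s : PySem.Set Nat) (x : Nat),
    x ∈ PySem.Set.update s l ↔ x ∈ s ∨ x ∈ l := by
  induction l with
  | nil => intro s x; simp [PySem.Set.update]
  | cons a l ih =>
    intro s x
    show x ∈ PySem.Set.update (PySem.Set.add s a) l ↔ _
    rw [ih, PySem.Set.mem_add]
    simp [or_assoc]

-- the mark pass only grows the set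
theorem pvMark_superset (lines : List (List Char)) (cum : List Int) (bnl : List Char)
    (n : Nat) : ∀ (fuel i : Nat) (acc : PySem.Set Nat) (x : Nat),
    x ∈ acc → x ∈ pvMark lines cum bnl n fuel i acc := by
  intro fuel
  induction fuel with
  | zero => intro i acc x hx; exact hx
  | succ fuel ih =>
    intro i acc x hx
    rw [pvMark]
    split
    · split
      · exact ih _ _ x ((pv_mem_set_update _ _ _).mpr (Or.inl hx))
      · exact ih _ _ x hx
    · exact hx

-- every index the mark pass adds lies at or beyond the current position
theorem pvMark_mem_ge (lines : List (List Char)) (cum : List Int) (bnl : List Char)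
    (n : Nat) : ∀ (fuel i : Nat) (acc : PySem.Set Nat) (x : Nat),
    x ∈ pvMark lines cum bnl n fuel i acc → x ∈ acc ∨ i ≤ x := by
  intro fuel
  induction fuel with
  | zero => intro i acc x hx; exact Or.inl hx
  | succ fuel ih =>
    intro i acc x hx
    rw [pvMark] at hx
    split at hx
    · split at hx
      · rcases ih _ _ x hx with h | h
        · rcases (pv_mem_set_update _ _ _).mp h with h' | h'
          · exact Or.inl h'
          · right; exact (List.mem_range'_1.mp h').1
        · right; have := le_pvFindEnd cum n (cum.getD i 0) n (i + 1); omega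
      · rcases ih _ _ x hx with h | h
        · exact Or.inl h
        · right; omega
    · exact Or.inl hx

-- contains on a Nat set is membership
theorem pv_contains_iff (s : PySem.Set Nat) (x : Nat) :
    PySem.Set.contains s x = true ↔ x ∈ s := by
  simp [PySem.Set.contains]

-- main invariant: from position i, filtering by the final mark set reproduces A's kept lines
theorem pvMain (lines : List (List Char)) (bnl : List Char) :
    ∀ (fuel i : Nat), lines.length - i ≤ fuel → i ≤ lines.length →
    ∀ (acc : PySem.Set Nat), (∀ x ∈ acc, x < i) →
    (((lines.drop i).zipIdx i).filter
        (fun p => !(PySem.Set.contains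
          (pvMark lines (pvScan 0 (lines.map pvDiff)) bnl lines.length fuel i acc) p.2))).map (·.1)
      = pvGoA bnl (lines.drop i) := by
  intro fuel
  induction fuel with
  | zero =>
    intro i hfuel hi acc hacc
    have : i = lines.length := by omega
    simp [this, pvGoA]
  | succ fuel ih =>
    intro i hfuel hi acc hacc
    by_cases hin : i < lines.length
    · have hdrop : lines.drop i = lines[i] :: lines.drop (i + 1) := List.drop_eq_getElem_cons hin
      have hgetD : lines.getD i [] = lines[i] := by
        simp [List.getD_eq_getElem?_getD, List.getElem?_eq_getElem hin]
      rw [pvMark, if_pos hin, hgetD]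
      rw [hdrop]
      by_cases hcond : PySem.Chars.startswith (PySem.Chars.strip lines[i]) (bnl ++ [' ', '{']) = true
      · rw [if_pos hcond]
        -- abbreviations
        set ds := lines.map pvDiff with hds
        have hlen : ds.length = lines.length := by simp [hds]
        set rest := lines.drop (i + 1) with hrest
        have hrlen : rest.length = lines.length - (i + 1) := by simp [hrest]
        have hCi : (pvScan 0 ds).getD i 0 = (ds.take i).sum := by
          rw [pvScan_getD ds 0 i (by omega)]; ring
        have hK : pvFindEnd (pvScan 0 ds) lines.length ((pvScan 0 ds).getD i 0) lines.length (i + 1)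
            = (i + 1) + pvSkipCnt (pvDiff lines[i]) (rest.map pvDiff) := by
          rw [hCi]
          have hfe := pvFindEnd_eq ds ((ds.take i).sum) ds.length (i + 1) (by omega) (by omega)
          rw [hlen] at hfe
          rw [hfe]
          have h1 : (ds.take (i + 1)).sum - (ds.take i).sum = pvDiff lines[i] := by
            rw [List.sum_take_succ ds i (by omega)]
            have : ds[i] = pvDiff lines[i] := by simp [hds]
            rw [this]; ring
          have h2 : ds.drop (i + 1) = rest.map pvDiff := by
            rw [hrest, hds, List.map_drop]
          rw [h1, h2]
        set K := pvSkipCnt (pvDiff lines[i]) (rest.map pvDiff) with hKdef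
        have hKle : K ≤ rest.length := by
          have := pvSkipCnt_le (pvDiff lines[i]) (rest.map pvDiff)
          simpa using this
        set j := (i + 1) + K with hj
        rw [hK]
        set acc' := PySem.Set.update acc (List.range' i ((i + 1) + K - i)) with hacc'
        set final := pvMark lines (pvScan 0 ds) bnl lines.length fuel j acc' with hfinal
        -- split rest at K
        have hsplit : rest = rest.take K ++ rest.drop K := (List.take_append_drop K rest).symm
        have htklen : (rest.take K).length = K := by rw [List.length_take]; omega
        -- membership of all indices i..j-1 in the final set
        have hmem : ∀ x : Nat, i ≤ x → x < j → x ∈ final := by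
          intro x h1 h2
          apply pvMark_superset
          rw [hacc', pv_mem_set_update]
          right
          rw [List.mem_range'_1]
          omega
        -- head is filtered out
        have hhead : (!(PySem.Set.contains final (lines[i], i).2)) = false := by
          simp only [Bool.not_eq_false']
          exact (pv_contains_iff _ _).mpr (hmem i le_rfl (by omega))
        -- the taken segment is filtered out entirely
        have htake : ((rest.take K).zipIdx (i + 1)).filter
            (fun p => !(PySem.Set.contains final p.2)) = [] := by
          rw [List.filter_eq_nil_iff]
          intro p hp
          have h1 : i + 1 ≤ p.2 := List.le_snd_of_mem_zipIdx hp
          have h2 : p.2 < i + 1 + (rest.take K).length := List.snd_lt_add_of_mem_zipIdx hp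
          rw [htklen] at h2
          simp only [Bool.not_eq_true, Bool.not_eq_false']
          exact (pv_contains_iff _ _).mpr (hmem p.2 (by omega) (by omega))
        -- assemble
        conv_lhs => rw [hsplit]
        rw [List.zipIdx_cons, List.zipIdx_append, htklen, List.filter_cons, hhead,
          List.filter_append, htake]
        simp only [Bool.false_eq_true, if_false, List.nil_append]
        have hdd : rest.drop K = lines.drop j := by
          rw [hrest, List.drop_drop]
        have hjle : j ≤ lines.length := by omega
        have hIH := ih j (by omega) hjle acc' (by
          intro x hx
          rcases (pv_mem_set_update _ _ _).mp (by rw [hacc'] at hx; exact hx) with h | h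
          · have := hacc x h; omega
          · have := List.mem_range'_1.mp h; omega)
        rw [← hfinal] at hIH
        rw [hdd, hIH]
        -- right side: A takes the same branch and skips the same lines
        rw [pvGoA, pvCondA_eq, hcond, if_pos rfl, pvSkipA_eq_drop, ← hKdef, hdd]
      · rw [if_neg hcond]
        rw [List.zipIdx_cons, List.filter_cons]
        have hkeep : (!(PySem.Set.contains
            (pvMark lines (pvScan 0 (lines.map pvDiff)) bnl lines.length fuel (i + 1) acc)
            (lines[i], i).2)) = true := by
          simp only [Bool.not_eq_true']
          rw [Bool.eq_false_iff]
          intro hc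
          have hm := (pv_contains_iff _ _).mp hc
          rcases pvMark_mem_ge lines (pvScan 0 (lines.map pvDiff)) bnl lines.length fuel (i + 1) acc i hm with h | h
          · have := hacc i h; omega
          · omega
        rw [hkeep, if_pos rfl]
        simp only [List.map_cons]
        rw [ih (i + 1) (by omega) (by omega) acc (fun x hx => by have := hacc x hx; omega)]
        rw [pvGoA, pvCondA_eq, if_neg hcond]
    · have : i = lines.length := by omega
      rw [pvMark, if_neg (by omega)]
      simp [this, pvGoA]

-- ===== VERDICT (by name: the statement is the Claim_ definition above) =====
theorem remove_sub_block_spec : Claim_equal_remove_sub_block := by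
  intro stanza block_name _
  unfold Spec_remove_sub_block remove_sub_block remove_sub_block_alt
  have h := pvMain (pvSplitKeep stanza.toList) block_name.toList
    ((pvSplitKeep stanza.toList).length + 1) 0 (by omega) (by omega) PySem.Set.empty
    (by intro x hx; simp [PySem.Set.empty] at hx)
  simp only [List.drop_zero] at h
  rw [← h]
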